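/- GENERATED by tools/from_farm_form.py from prooffarm-gif/accepted/DGifDecompressLine.14/Lemmas.lean (a worked proof of the farm's unit `DGifDecompressLine.14`,
   accepted by the verdict) — do not edit. -/
import Gif.Spec.Units.DGifDecompressLine_14
import Gif.Spec.AllSegs

/-!
  Lemmas for the unit `DGifDecompressLine.14` (segment 14 of the LZW decoder, 106F43H … 106F7DH; dgif_lib.c:986-988 and 995):
  the segment is walked in TWO STEPS that meet at the return address 106F53H (`ret31`) of the call of `DGifGetPrefixChar`. The
  assertion there is the entry's own family, `UpdRC` at the label `ret31` (every register it speaks of is callee-saved; `eax`, the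
  callee's result, is ANY value: only its low byte is stored, into `Suffix[RunningCode − 2]`).

      dl14_seg_call    106F43H … the call of DGifGetPrefixChar … 106F53H:  `UpdRC at_106f43` → `UpdRC ret31`
      dl14_seg_tail    106F53H … 106F7DH:                                   `UpdRC ret31` → `Head` with a smaller measure

  Everything general is in the tree: `Body.carry`, `dl_scratch`, `Body.pv_inside` (Gif/Spec/LzwCarry.lean), `Env.at_call`
  (Gif/Spec/FrameCarry.lean), `suffixLive` (Gif/Spec/Common.lean §6), `sext32_small` (Gif/Spec/Words.lean).
-/

open X86 X86.User Asan ProgX.Base ProgX.Base.Spec Gif.Spec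

set_option maxRecDepth 4000
set_option maxHeartbeats 4000000

namespace Gif.Spec.DGifDecompressLine_14

/-- **106F43H … the call of DGifGetPrefixChar … 106F53H (ret31)** (dgif_lib.c:987 `DGifGetPrefixChar(Prefix, LastCode, ClearCode)`):
`edx` = ClearCode from `[rsp+10H]` (not negative by [LZ2]), `esi` = LastCode from `[rsp+14H]` (any value), `rdi = r13 = Prefix`. The
callee stores nothing but its own stack: `Body`, `Locals` and the measure are carried by `Body.carry`. -/
theorem dl14_seg_call (Lay : Layout) (hLay : Lay.hi = 0x1000000) (μ : Microarch) (hμ : UserX.MicroOK μ) (u₀ : State)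
    (hcode : HasCodeNat Lay u₀ Gif.L.DGifDecompressLine.entry Gif.Code.code_DGifDecompressLine.nat
      Gif.L.DGifDecompressLine.size)
    (H : Heap) (rest : List Obj) (frames : List (Nat × FrameLayout)) (F : Forest) (R : Rd) (n m : Nat) (e : State) (ret : Word)
    (h_gpc : Calls Lay μ ProgX.Base.WayInv (ProgX.Base.conv u₀) Gif.L.DGifGetPrefixChar.entry
      (Gif.Spec.DGifGetPrefixChar.spec H rest (DGifDecompressLine.framesIn frames e) F.pv))
    (v : State) (hat : DGifDecompressLine.UpdRC Gif.L.DGifDecompressLine.at_106f43 m H rest frames F R n u₀ e ret v) :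
    ReachVia Lay μ ProgX.Base.WayInv v
      (DGifDecompressLine.UpdRC Gif.L.DGifDecompressLine.ret31 m H rest frames F R n u₀ e ret) := by
  -- 1. THE PRELUDE (the same in every segment of this function; Gif/Spec/LzwCarry.lean §2)
  obtain ⟨⟨⟨hbody, hloc, h_r14, h_r13, h_rbx, h_rbp, h_w1⟩, h_mu⟩, h_lo, h_hi⟩ := hat
  have he := hbody.entry
  v_entry he
  have henv : Env H rest frames F R e := hbody.pre.1
  have hgin := hbody.gif_inside
  have hpin := hbody.pv_inside
  have hn31 : n < 2 ^ 31 := hbody.len_lt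
  have w_rip := hbody.rip
  have c_rsp : v.reg .rsp = e.reg .rsp - 200 := hbody.rsp
  have w_eq : Mem.EqOn ProgX.Base.L.textLo ProgX.Base.L.textHi u₀.mem v.mem := ProgX.Base.conv_code_eqOn hbody.code
  have hdf : v.flags .df = false := (show abiInv _ from hbody.abi).1
  have hmx : v.mxcsr &&& 0x1F80 = 0x1F80 := (show abiInv _ from hbody.abi).2
  have hsse := ProgX.Base.sseOK_of_abiInv hbody.abi
  have w_kept : RegsKept [.rsp] v v := RegsKept.refl _ _
  -- 2. THE SLOTS THE SEGMENT READS: ClearCode (as the private object holds it: at most 256), LastCode (any value)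
  have hclear : GifFilePrivateType.ClearCode v.mem F.pv ≤ 256 := hbody.lz.clear
  obtain ⟨cc, hcc⟩ : ∃ cc, GifFilePrivateType.ClearCode v.mem F.pv = cc := ⟨_, rfl⟩
  rw [hcc] at hclear
  have k_clear : v.mem.readLE (e.reg .rsp - 184) 4 = cc := hloc.s_clear.trans hcc
  obtain ⟨lc, k_last⟩ : ∃ lc, v.mem.readLE (e.reg .rsp - 180) 4 = lc := ⟨_, rfl⟩
  -- 3. THE WALK, to the call's return address
  u_walk hcode [hμ.vendor] until [Gif.L.DGifDecompressLine.ret31]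
    span [ProgX.Base.L.textLo, ProgX.Base.L.textHi] side (v_side)
  case call_inv =>
    v_inv
  case pre_106f4e =>
    -- DGifGetPrefixChar'S PRECONDITION. The heap's precondition for the frame list with the own frame in front: only the return
    -- address was pushed since `v`
    have hs : Mem.SameExcept [⟨(e.reg .rsp).toNat - 560, (e.reg .rsp).toNat - 200⟩] v.mem s_106f4e.mem := by
      rw [w_mem]
      u_same
    have henv' : Env H rest (DGifDecompressLine.framesIn frames e) F R s_106f4e := by
      refine henv.at_call hbody.inv hbody.ok hs (by omega) (by omega) ?_ ?_ ?_
      · rw [w_rsp]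
        u_omega
      · rw [w_rsp]
        u_omega
      · rw [w_rsp]
        u_omega
    -- the four clauses: `HeapPre`, pv live, `rdi = Prefix`, `0 ≤ ClearCode`
    refine ⟨henv'.heap, hbody.ok.pv_live, ?_, ?_⟩
    · rw [w_rdi]
      exact h_r13
    · rw [w_rdx, Gif.Spec.toNat_ofBV_ofNat32 cc (by omega)]
      omega
  -- 0x106f53 (ret31): DGifGetPrefixChar HAS RETURNED. Its post: no shadow byte written; its footprint: its own stack
  have hpost : ShadowUntouched s_106f4e.mem s_106f4er.mem := w_post
  v_after_call w_rsp_106f4e w_mem_106f4e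
  -- what was stored since `v`: the return address of the call, the callee's frame (all below the body's stack pointer)
  have hun : ShadowUntouched v.mem s_106f4er.mem := by v_untouched
  have hsame : Mem.SameExcept [⟨(e.reg .rsp).toNat - 560, (e.reg .rsp).toNat - 200⟩] v.mem s_106f4er.mem := by u_same
  obtain ⟨k_body, k_loc, k_mu, k_clear', k_eof⟩ :=
    hbody.carry (cut' := Gif.L.DGifDecompressLine.ret31) w_rip w_rsp w_eq w_inv hun hsame (by dl_scratch)
  -- THE EXIT ASSERTION: `UpdRC` at `ret31`: `Body`, `Locals`, the callee-saved registers, the measure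
  refine ReachVia.done ⟨⟨⟨k_body, k_loc hloc, ?_, ?_, ?_, ?_, ?_⟩, ?_⟩, ?_, ?_⟩
  · -- r14 = Private
    rw [w_kept.get .r14 rfl]
    exact h_r14
  · -- r13 = Prefix
    rw [w_kept.get .r13 rfl]
    exact h_r13
  · -- ebx = StackPtr
    rw [w_kept.get .rbx rfl]
    exact h_rbx
  · -- ebp = i
    rw [w_kept.get .rbp rfl]
    exact h_rbp
  · -- W1
    rw [w_kept.get .rbp rfl, w_kept.get .rbx rfl]
    exact h_w1
  · -- the measure: no store touched it
    rw [k_mu]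
    exact h_mu
  · -- r15d = RunningCode
    rw [w_kept.get .r15 rfl]
    exact h_lo
  · rw [w_kept.get .r15 rfl]
    exact h_hi

/-- **106F53H (ret31) … 106F7DH, the head of the main loop** (dgif_lib.c:986-988, 995): the callee's result `eax` to the slot
`[rsp+14H]`; `r12 = Suffix + (long)RunningCode − 2` (`r15d` = RunningCode in `[2, 4097]`: an element of `Suffix[4096]`); the
checked store of the result's low byte there; `LastCode = CrntCode` (the frame's object `[rsp+70H]` to the slot `[rsp+14H]`). All
stores are scratch windows: the measure is what it was, below `m`. -/
theorem dl14_seg_tail (Lay : Layout) (hLay : Lay.hi = 0x1000000) (μ : Microarch) (hμ : UserX.MicroOK μ) (u₀ : State)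
    (hcode : HasCodeNat Lay u₀ Gif.L.DGifDecompressLine.entry Gif.Code.code_DGifDecompressLine.nat
      Gif.L.DGifDecompressLine.size)
    (H : Heap) (rest : List Obj) (frames : List (Nat × FrameLayout)) (F : Forest) (R : Rd) (n m : Nat) (e : State) (ret : Word)
    (h_asan_store1_noabort : Asan.SmallCheck Lay μ ProgX.Base.WayInv (ProgX.Base.CodeOK u₀) [.rax, .rdx] 1
      ProgX.Base.L.__asan_store1_noabort.entry)
    (v : State) (hat : DGifDecompressLine.UpdRC Gif.L.DGifDecompressLine.ret31 m H rest frames F R n u₀ e ret v) :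
    ReachVia Lay μ ProgX.Base.WayInv v
      (fun w => ∃ m', m' < m ∧ DGifDecompressLine.Head m' H rest frames F R n u₀ e ret w) := by
  -- 1. THE PRELUDE (as in `dl14_seg_call`)
  obtain ⟨⟨⟨hbody, hloc, h_r14, h_r13, h_rbx, h_rbp, h_w1⟩, h_mu⟩, h_lo, h_hi⟩ := hat
  have he := hbody.entry
  v_entry he
  have hgin := hbody.gif_inside
  have hpin := hbody.pv_inside
  have hn31 : n < 2 ^ 31 := hbody.len_lt
  have w_rip := hbody.rip
  have c_rsp : v.reg .rsp = e.reg .rsp - 200 := hbody.rsp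
  have w_eq : Mem.EqOn ProgX.Base.L.textLo ProgX.Base.L.textHi u₀.mem v.mem := ProgX.Base.conv_code_eqOn hbody.code
  have hdf : v.flags .df = false := (show abiInv _ from hbody.abi).1
  have hmx : v.mxcsr &&& 0x1F80 = 0x1F80 := (show abiInv _ from hbody.abi).2
  have hsse := ProgX.Base.sseOK_of_abiInv hbody.abi
  have w_kept : RegsKept [.rsp] v v := RegsKept.refl _ _
  -- 2. THE REGISTERS AND SLOTS THE SEGMENT READS
  -- `r15d` = RunningCode ≤ 4097: `movsxd rax, r15d` is the register itself (a fact for the walker)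
  have hrc31 : (v.reg .r15).toNat < 2 ^ 31 := by omega
  have k_suffix : v.mem.readLE (e.reg .rsp - 176) 8 = F.pv + 4439 := hloc.s_suffix
  -- the frame's object `CrntCode`, as a number (any value)
  obtain ⟨crnt, k_crnt⟩ : ∃ crnt, v.mem.readLE (e.reg .rsp - 88) 4 = crnt := ⟨_, rfl⟩
  -- 3. THE WALK, to the head of the main loop
  u_walk hcode [hμ.vendor, Gif.Spec.sext32_small (v.reg .r15) hrc31] until [Gif.L.DGifDecompressLine.at_106f7d]
    span [ProgX.Base.L.textLo, ProgX.Base.L.textHi] side (v_side)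
  -- 4. THE CHECK GOAL
  case check_106f67 =>
    -- l.986 `Suffix[RunningCode − 2] =`: inside `Suffix[4096]`, by `2 ≤ RunningCode ≤ 4097`
    have hun : ShadowUntouched v.mem s_106f67.mem := by v_untouched
    have hl := suffixLive hbody.ok.pv_live rest (DGifDecompressLine.framesIn frames e) ((v.reg .r15).toNat - 2) (by omega)
    simp only [gfield] at hl
    exact hl.accSmall hbody.inv.shadow hun _ 1 (by decide) (by u_omega) (by u_omega)
  -- 5. THE EXIT 0x106f7d (l.888): the head of the main loop, `Head` with the measure of the exit state
  -- what was stored: the return address of the check, `Suffix[RunningCode − 2]`, the slot of LastCode (twice)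
  have hun : ShadowUntouched v.mem s_106f79.mem := by v_untouched
  have hsame : Mem.SameExcept [⟨(e.reg .rsp).toNat - 208, (e.reg .rsp).toNat - 200⟩,
      ⟨(e.reg .rsp).toNat - 180, (e.reg .rsp).toNat - 176⟩, ⟨F.pv + 4439, F.pv + 8535⟩] v.mem s_106f79.mem := by
    rw [w_mem]
    u_same
  have habi : (conv u₀).inv s_106f79 := by v_inv
  obtain ⟨k_body, k_loc, k_mu, k_clear, k_eof⟩ :=
    hbody.carry (cut' := Gif.L.DGifDecompressLine.at_106f7d) w_rip w_rsp w_eq habi hun hsame (by dl_scratch)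
  -- `Head`: `Body`, `Locals`, the registers of the main loop (none written), the measure
  refine ReachVia.done ⟨mu R s_106f79.mem F.pv, ?_, ⟨k_body, k_loc hloc, ?_, ?_, ?_, ?_, ?_⟩, rfl⟩
  · -- the measure: no store of the segment touched it
    rw [k_mu]
    exact h_mu
  · -- r14 = Private
    rw [w_kept.get .r14 rfl]
    exact h_r14
  · -- r13 = Prefix
    rw [w_kept.get .r13 rfl]
    exact h_r13
  · -- ebx = StackPtr
    rw [w_kept.get .rbx rfl]
    exact h_rbx
  · -- ebp = i
    rw [w_kept.get .rbp rfl]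
    exact h_rbp
  · -- W1
    rw [w_kept.get .rbp rfl, w_kept.get .rbx rfl]
    exact h_w1

end Gif.Spec.DGifDecompressLine_14
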